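-- pv_equiv track=rewrite | github.com/daseme/ctv-bookedbiz-db | src/services/bill_code_parser.py | validate_bill_code_format
-- ===== SOURCE A (Python) =====
-- def validate_bill_code_format(bill_code: str) -> bool:
--     """
--     Validate if a bill code has a valid format without parsing.
--
--     Args:
--         bill_code: The bill code to validate
--
--     Returns:
--         True if valid format, False otherwise
--     """
--     if not bill_code or not str(bill_code).strip():
--         return False
--
--     bill_code = str(bill_code).strip()
--
--     # Check for basic validity
--     if ":" in bill_code:
--         # Should have exactly one colon with non-empty parts
--         parts = bill_code.split(":")
--         return len(parts) == 2 and all(part.strip() for part in parts)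
--     else:
--         # Direct customer - just needs to be non-empty
--         return bool(bill_code.strip())
-- ===== SOURCE B (Python) =====
-- def validate_bill_code_format(bill_code: str) -> bool:
--     """Single pass over the stripped string: count colons and track whether a
--     non-whitespace character appears before and after the first colon."""
--     s = str(bill_code).strip()
--     if not s:
--         return False
--     colons = 0
--     left = right = False
--     for ch in s:
--         if ch == ":":
--             colons += 1
--         elif not ch.isspace():
--             if colons == 0:
--                 left = True
--             else:
--                 right = True
--     return colons == 0 or (colons == 1 and left and right)
-- ===== Notes on version B (the rewrite author's own statement) =====
-- stated objective: alternative
-- what changed: A strips, then splits on the colon and inspects the resulting list of parts; B makes a single character pass over the stripped string, counting colons and tracking whether a non-whitespace character occurs before and after the first colon, with no intermediate part lists.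
import Mathlib
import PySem

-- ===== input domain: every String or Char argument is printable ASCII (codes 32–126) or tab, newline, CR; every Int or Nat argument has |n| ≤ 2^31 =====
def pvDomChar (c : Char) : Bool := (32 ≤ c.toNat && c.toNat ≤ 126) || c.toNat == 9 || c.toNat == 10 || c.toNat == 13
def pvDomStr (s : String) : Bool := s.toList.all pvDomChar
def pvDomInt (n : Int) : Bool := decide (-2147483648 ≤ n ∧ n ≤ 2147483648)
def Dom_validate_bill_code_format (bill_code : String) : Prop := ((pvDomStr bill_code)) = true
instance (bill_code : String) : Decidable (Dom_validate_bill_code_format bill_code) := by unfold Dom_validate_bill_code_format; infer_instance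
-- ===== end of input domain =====

-- B replaces A's colon-split/branching with a single character pass that counts colons and
-- tracks non-whitespace on each side of the first colon (alternative decomposition, same cost).


-- ===== PORT A =====
def validate_bill_code_format (bill_code : String) : Bool :=
  -- `if not bill_code or not str(bill_code).strip(): return False` (str truthiness = length ≠ 0)
  if PySem.Str.len bill_code == 0 || PySem.Str.len (PySem.Str.strip bill_code) == 0 then false
  else
    let s := PySem.Str.strip bill_code
    if PySem.Str.isIn ":" s then
      -- parts = bill_code.split(":")  (sep ":" is nonempty, so split? never returns none)
      let parts := (PySem.Str.split? s ":").getD []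
      decide (parts.length = 2) && parts.all (fun p => !(PySem.Str.len (PySem.Str.strip p) == 0))
    else
      !(PySem.Str.len (PySem.Str.strip s) == 0)

-- ===== PORT B =====
-- the for-loop of Source B: state (colons, left, right)
def bcScan : List Char → Nat → Bool → Bool → Nat × Bool × Bool
  | [], colons, left, right => (colons, left, right)
  | ch :: rest, colons, left, right =>
    if ch = ':' then bcScan rest (colons + 1) left right
    else if !PySem.Chars.isspace ch then
      if colons = 0 then bcScan rest colons true right
      else bcScan rest colons left true
    else bcScan rest colons left right

def validate_bill_code_format_alt (bill_code : String) : Bool :=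
  let s := (PySem.Str.strip bill_code).toList
  if s.isEmpty then false
  else
    let st := bcScan s 0 false false
    st.1 == 0 || (st.1 == 1 && st.2.1 && st.2.2)

-- ===== PRECONDITION & SPEC =====
def Spec_validate_bill_code_format (bill_code : String) (out : Bool) : Prop := out = validate_bill_code_format_alt bill_code
instance (bill_code : String) (out : Bool) : Decidable (Spec_validate_bill_code_format bill_code out) := by unfold Spec_validate_bill_code_format; infer_instance

-- ===== CLAIM (what is proved, stated in full; the proofs are below) =====
def Claim_equal_validate_bill_code_format : Prop := ∀ (bill_code : String), Dom_validate_bill_code_format bill_code → Spec_validate_bill_code_format bill_code (validate_bill_code_format bill_code)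

-- ===== LEMMAS AND PROOFS =====

-- what Python's str.split(":") computes, structurally
def splitC (c : Char) : List Char → List (List Char)
  | [] => [[]]
  | x :: xs => if x = c then [] :: splitC c xs else (splitC c xs).modifyHead (x :: ·)

theorem splitC_ne_nil (c : Char) (l : List Char) : splitC c l ≠ [] := by
  induction l with
  | nil => simp [splitC]
  | cons x xs ih =>
    simp only [splitC]
    split
    · simp
    · cases h : splitC c xs with
      | nil => exact absurd h ih
      | cons hd tl => simp [List.modifyHead]

theorem go_single (c : Char) : ∀ (fuel : Nat) (l cur : List Char) (acc : List (List Char)), l.length < fuel →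
    PySem.Chars.splitOn.go [c] fuel l cur acc
      = acc.reverse ++ (splitC c l).modifyHead (cur.reverse ++ ·) := by
  intro fuel
  induction fuel with
  | zero => intro l cur acc h; omega
  | succ f ih =>
    intro l cur acc h
    cases l with
    | nil => simp [PySem.Chars.splitOn.go, splitC]
    | cons x xs =>
      by_cases hx : c = x
      · subst hx
        rw [show PySem.Chars.splitOn.go [c] (f+1) (c :: xs) cur acc
              = PySem.Chars.splitOn.go [c] f xs [] (cur.reverse :: acc) by
            simp [PySem.Chars.splitOn.go, List.isPrefixOf]]
        rw [ih xs [] (cur.reverse :: acc) (by simpa using Nat.lt_of_succ_lt_succ h)]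
        simp only [splitC, List.reverse_cons, List.modifyHead]
        cases splitC c xs <;> simp
      · rw [show PySem.Chars.splitOn.go [c] (f+1) (x :: xs) cur acc
              = PySem.Chars.splitOn.go [c] f xs (x :: cur) acc by
            simp [PySem.Chars.splitOn.go, List.isPrefixOf, hx]]
        rw [ih xs (x :: cur) acc (by simpa using Nat.lt_of_succ_lt_succ h)]
        have hne := splitC_ne_nil c xs
        cases hsp : splitC c xs with
        | nil => exact absurd hsp hne
        | cons hd tl => simp [splitC, Ne.symm hx, hsp, List.modifyHead]

theorem splitOn_single (c : Char) (l : List Char) :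
    PySem.Chars.splitOn l [c] = splitC c l := by
  rw [PySem.Chars.splitOn, go_single c (l.length + 1) l [] [] (by omega)]
  cases h : splitC c l with
  | nil => exact absurd h (splitC_ne_nil c l)
  | cons hd tl => simp [List.modifyHead]

theorem length_splitC (c : Char) (l : List Char) :
    (splitC c l).length = l.count c + 1 := by
  induction l with
  | nil => simp [splitC]
  | cons x xs ih =>
    simp only [splitC]
    by_cases hx : x = c
    · simp [hx, ih]
    · simp [hx, ih]

theorem splitC_of_count_zero (c : Char) (l : List Char) (h : l.count c = 0) :
    splitC c l = [l] := by
  induction l with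
  | nil => simp [splitC]
  | cons x xs ih =>
    simp only [List.count_cons] at h
    have hx : ¬ x = c := by intro hh; simp [hh] at h
    have hxs : xs.count c = 0 := by omega
    simp [splitC, hx, ih hxs, List.modifyHead]

theorem splitC_of_count_one (c : Char) (l : List Char) (h : l.count c = 1) :
    splitC c l = [l.takeWhile (fun ch => !(ch == c)), (l.dropWhile (fun ch => !(ch == c))).tail] := by
  induction l with
  | nil => simp at h
  | cons x xs ih =>
    simp only [List.count_cons] at h
    by_cases hx : x = c
    · subst hx
      have hxs : xs.count x = 0 := by simp at h; omega
      simp [splitC, splitC_of_count_zero x xs hxs, List.takeWhile, List.dropWhile]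
    · have hxs : xs.count c = 1 := by simp [hx] at h; omega
      have hb : (x == c) = false := by simp [hx]
      simp [splitC, hx, ih hxs, hb, List.modifyHead]

-- strip l is empty iff every character of l is whitespace
theorem strip_eq_nil_iff (l : List Char) :
    PySem.Chars.strip l = [] ↔ l.all PySem.Chars.isspace = true := by
  simp only [PySem.Chars.strip, PySem.Chars.rstrip, PySem.Chars.lstrip,
    List.reverse_eq_nil_iff, List.dropWhile_eq_nil_iff, List.mem_reverse, List.all_eq_true]
  constructor
  · intro h x hx
    have hx' : x ∈ List.takeWhile PySem.Chars.isspace l ++ List.dropWhile PySem.Chars.isspace l := by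
      rw [List.takeWhile_append_dropWhile]; exact hx
    rcases List.mem_append.1 hx' with h1 | h2
    · exact List.mem_takeWhile_imp h1
    · exact h x h2
  · intro h x hx
    exact h x ((List.dropWhile_sublist _).subset hx)

-- a non-empty strip result contains a non-whitespace character
theorem strip_not_all_isspace (l : List Char) (h : PySem.Chars.strip l ≠ []) :
    (PySem.Chars.strip l).all PySem.Chars.isspace = false := by
  have hd : List.dropWhile PySem.Chars.isspace (PySem.Chars.lstrip l).reverse ≠ [] := by
    intro hh
    apply h
    simp [PySem.Chars.strip, PySem.Chars.rstrip, hh]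
  rw [List.all_eq_false]
  refine ⟨(List.dropWhile PySem.Chars.isspace (PySem.Chars.lstrip l).reverse).head hd, ?_, ?_⟩
  · show _ ∈ PySem.Chars.strip l
    simp only [PySem.Chars.strip, PySem.Chars.rstrip, List.mem_reverse]
    exact List.head_mem hd
  · simp [List.head_dropWhile_not PySem.Chars.isspace hd]

theorem any_not_eq_not_all (l : List Char) (p : Char → Bool) :
    l.any (fun x => !p x) = !l.all p := by
  rw [Bool.eq_iff_iff]
  simp [List.any_eq_true]

-- the scanner once a colon has been seen: left is frozen, right collects non-whitespace
theorem bcScan_pos (cs : List Char) : ∀ (colons : Nat) (l r : Bool), colons ≠ 0 →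
    bcScan cs colons l r = (colons + cs.count ':', l,
      r || cs.any (fun ch => !(ch == ':') && !PySem.Chars.isspace ch)) := by
  induction cs with
  | nil => intro colons l r h; simp [bcScan]
  | cons x xs ih =>
    intro colons l r h
    by_cases hx : x = ':'
    · subst hx
      simp only [bcScan, if_true]
      rw [ih _ _ _ (by omega)]
      simp [Prod.ext_iff]
      omega
    · by_cases hsp : PySem.Chars.isspace x = true
      · simp only [bcScan, if_neg hx, hsp, Bool.not_true, Bool.false_eq_true, if_false]
        rw [ih _ _ _ h]
        simp [hx, hsp]
      · simp only [bcScan, if_neg hx, eq_false_of_ne_true hsp, Bool.not_false, if_true, if_neg h]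
        rw [ih _ _ _ h]
        simp [hx, eq_false_of_ne_true hsp]

-- the scanner from the start
theorem bcScan_zero (cs : List Char) : ∀ (l r : Bool),
    bcScan cs 0 l r = (cs.count ':',
      l || (cs.takeWhile (fun ch => !(ch == ':'))).any (fun ch => !PySem.Chars.isspace ch),
      r || ((cs.dropWhile (fun ch => !(ch == ':'))).tail).any
            (fun ch => !(ch == ':') && !PySem.Chars.isspace ch)) := by
  induction cs with
  | nil => intro l r; simp [bcScan]
  | cons x xs ih =>
    intro l r
    by_cases hx : x = ':'
    · subst hx
      simp only [bcScan, if_true]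
      rw [bcScan_pos xs 1 l r (by omega)]
      simp
      omega
    · by_cases hsp : PySem.Chars.isspace x = true
      · simp only [bcScan, if_neg hx, hsp, Bool.not_true, Bool.false_eq_true, if_false]
        rw [ih]
        simp [hx, hsp]
      · simp only [bcScan, if_neg hx, eq_false_of_ne_true hsp, Bool.not_false, if_true]
        rw [ih]
        simp [hx, eq_false_of_ne_true hsp]

-- ===== VERDICT (by name: the statement is the Claim_ definition above) =====
theorem validate_bill_code_format_spec : Claim_equal_validate_bill_code_format := by
  intro bc _
  unfold Spec_validate_bill_code_format validate_bill_code_format validate_bill_code_format_alt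
  simp only [PySem.Str.len_eq, PySem.Str.toList_strip]
  set cs := PySem.Chars.strip bc.toList with hcs
  by_cases h0 : cs = []
  · simp [h0]
  · have hbc : bc.toList ≠ [] := by
      intro hh; apply h0; rw [hcs, hh]; rfl
    have g1 : (((bc.toList.length : Int)) == 0) = false := by
      simp only [beq_eq_false_iff_ne, Ne, Nat.cast_eq_zero, List.length_eq_zero_iff]
      exact hbc
    have g2 : (((cs.length : Int)) == 0) = false := by
      simp only [beq_eq_false_iff_ne, Ne, Nat.cast_eq_zero, List.length_eq_zero_iff]
      exact h0
    rw [g1, g2]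
    simp only [Bool.or_self, List.isEmpty_iff, if_neg h0, Bool.false_eq_true, if_false]
    have hiin : PySem.Str.isIn ":" (PySem.Str.strip bc) = true ↔ ':' ∈ cs := by
      rw [PySem.Str.isIn_iff_infix, PySem.Str.toList_strip, ← hcs]
      exact List.singleton_infix_iff ':' cs
    rw [bcScan_zero cs false false]
    by_cases hm : ':' ∈ cs
    · rw [if_pos (hiin.2 hm)]
      -- decompose cs around its first colon
      have hdw : cs.dropWhile (fun ch => !(ch == ':')) ≠ [] := by
        intro hh
        rw [List.dropWhile_eq_nil_iff] at hh
        have := hh ':' hm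
        simp at this
      set tk := cs.takeWhile (fun ch => !(ch == ':')) with htk
      set d := cs.dropWhile (fun ch => !(ch == ':')) with hd
      have hsplit_cs : tk ++ d = cs := List.takeWhile_append_dropWhile
      have hhead : (fun ch => !(ch == ':')) (d.head hdw) = false := List.head_dropWhile_not _ hdw
      have hheadc : d.head hdw = ':' := by simpa using hhead
      have htkc : tk.count ':' = 0 := by
        rw [List.count_eq_zero]
        intro hmem
        have := List.mem_takeWhile_imp hmem
        simp at this
      have hdcons : d = ':' :: d.tail := by
        conv_lhs => rw [← List.cons_head_tail hdw]
        rw [hheadc]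
      have hcount : cs.count ':' = 1 + (d.tail).count ':' := by
        rw [← hsplit_cs, List.count_append, htkc, hdcons, List.count_cons]
        simp
        omega
      have hsplit : PySem.Str.split? (PySem.Str.strip bc) ":" = some ((splitC ':' cs).map String.ofList) := by
        simp [PySem.Str.split?, PySem.Chars.split?, PySem.Str.toList_strip, ← hcs,
          show (":" : String).toList = [':'] from rfl, splitOn_single]
      rw [hsplit]
      by_cases hone : cs.count ':' = 1
      · -- exactly one colon: both sides reduce to "non-blank left and non-blank right"
        have hdtc : (d.tail).count ':' = 0 := by omega
        have hnotmem : ':' ∉ d.tail := List.count_eq_zero.1 hdtc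
        rw [splitC_of_count_one ':' cs hone, ← htk, ← hd]
        have btk : ((((PySem.Chars.strip tk).length : Int)) == 0) = tk.all PySem.Chars.isspace := by
          rw [Bool.eq_iff_iff]
          simp [List.length_eq_zero_iff, strip_eq_nil_iff]
        have bdp : ((((PySem.Chars.strip d.tail).length : Int)) == 0) = (d.tail).all PySem.Chars.isspace := by
          rw [Bool.eq_iff_iff]
          simp [List.length_eq_zero_iff, strip_eq_nil_iff]
        have eq_q : (d.tail).any (fun ch => !(ch == ':') && !PySem.Chars.isspace ch)
            = (d.tail).any (fun ch => !PySem.Chars.isspace ch) := by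
          refine PySem.List.any_congr_mem (fun x hx => ?_)
          have hxne : ¬ (x == ':') = true := by
            intro he
            have hxc : x = ':' := by simpa using he
            exact hnotmem (hxc ▸ hx)
          simp [Bool.eq_false_iff.2 hxne]
        simp only [Option.getD_some, List.map_cons, List.map_nil, List.length_cons,
          List.length_nil, List.all_cons, List.all_nil, String.toList_ofList, btk, bdp,
          eq_q, hone, ← any_not_eq_not_all]
        simp
      · -- two or more colons: both sides are false
        have h2 : 2 ≤ cs.count ':' := by
          have : 0 < cs.count ':' := List.count_pos_iff.2 hm
          omega
        simp only [Option.getD_some]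
        have hne2 : ¬ (cs.count ':' + 1 = 2) := by omega
        have e0 : (cs.count ':' == 0) = false := by simp; omega
        have e1 : (cs.count ':' == 1) = false := by simp; omega
        simp [List.length_map, length_splitC, hne2, e0, e1]
    · -- no colon: A returns truthiness of the (already stripped) string, B sees colons = 0
      have hfalse : PySem.Str.isIn ":" (PySem.Str.strip bc) = false := by
        rw [Bool.eq_false_iff]
        intro hh
        exact hm (hiin.1 hh)
      rw [hfalse]
      have hcnt : cs.count ':' = 0 := List.count_eq_zero.2 hm
      have hstrip : PySem.Chars.strip cs ≠ [] := by
        rw [Ne, strip_eq_nil_iff]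
        intro hall
        have := strip_not_all_isspace bc.toList (hcs ▸ h0)
        rw [← hcs] at this
        simp [hall] at this
      simp [hcnt, List.length_eq_zero_iff, hstrip]
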